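-- pv_equiv track=rewrite | github.com/csc591-IoT/project3 | mqtt_subscriber.py | mqtt_publish_header_len
-- ===== SOURCE A (Python) =====
-- def mqtt_publish_header_len(topic: str, qos: int, payload_len: int) -> int:
--     """
--     Estimate MQTT 3.1.1 PUBLISH header bytes (fixed + variable; no payload).
--     - Fixed header: 1 + VarInt(remaining_length)
--     - Variable: 2 + len(topic) + (2 if qos>0)
--     remaining_length = variable + payload_len
--     """
--     variable = 2 + len(topic) + (2 if qos > 0 else 0)
--     remaining = variable + payload_len
--
--     # VarInt length for Remaining Length
--     v = remaining
--     varbytes = 1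
--     while v > 127:
--         v //= 128
--         varbytes += 1
--
--     fixed = 1 + varbytes
--     return fixed + variable
-- ===== SOURCE B (Python) =====
-- def mqtt_publish_header_len(topic: str, qos: int, payload_len: int) -> int:
--     variable = 2 + len(topic) + (2 if qos > 0 else 0)
--     remaining = variable + payload_len
--     # closed-form VarInt byte count: number of 7-bit groups of remaining
--     varbytes = 1 if remaining <= 127 else (remaining.bit_length() + 6) // 7
--     return 1 + varbytes + variable
-- ===== Notes on version B (the rewrite author's own statement) =====
-- stated objective: simpler
-- what changed: Replaced the while-loop that repeatedly floor-divides the remaining length by 128 with a closed-form VarInt byte count computed from bit_length ((bit_length+6)//7, guarded by remaining<=127).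
import Mathlib
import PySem

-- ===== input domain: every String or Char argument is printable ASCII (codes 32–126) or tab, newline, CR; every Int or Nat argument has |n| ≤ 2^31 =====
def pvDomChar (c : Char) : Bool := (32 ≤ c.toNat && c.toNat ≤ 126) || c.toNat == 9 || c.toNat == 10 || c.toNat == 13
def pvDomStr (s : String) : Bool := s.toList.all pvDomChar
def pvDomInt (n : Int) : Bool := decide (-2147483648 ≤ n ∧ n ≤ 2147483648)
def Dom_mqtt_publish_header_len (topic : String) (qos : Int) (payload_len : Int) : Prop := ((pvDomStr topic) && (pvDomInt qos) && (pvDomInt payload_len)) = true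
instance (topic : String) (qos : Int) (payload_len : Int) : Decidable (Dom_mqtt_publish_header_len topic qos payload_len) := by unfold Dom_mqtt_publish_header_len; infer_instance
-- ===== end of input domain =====

-- B replaces A's VarInt while-loop by a closed-form byte count from bit_length; objective: simpler.

-- ===== PORT A =====
-- the 'while v > 127: v //= 128; varbytes += 1' loop, as structural recursion on v.toNat
def pvVarintLoop (v : Int) (varbytes : Int) : Int :=
  if h : 127 < v then pvVarintLoop (PySem.Int.floordiv v 128) (varbytes + 1) else varbytes
termination_by v.toNat
decreasing_by
  have h1 : PySem.Int.floordiv v 128 < v :=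
    (PySem.Int.floordiv_lt_iff_lt_mul (by norm_num)).mpr (by nlinarith)
  have h2 : (0 : Int) ≤ PySem.Int.floordiv v 128 :=
    (PySem.Int.le_floordiv_iff_mul_le (by norm_num)).mpr (by omega)
  omega

def mqtt_publish_header_len (topic : String) (qos : Int) (payload_len : Int) : Int :=
  let variable_ := 2 + PySem.Str.len topic + (if 0 < qos then 2 else 0)
  let remaining := variable_ + payload_len
  let varbytes := pvVarintLoop remaining 1
  let fixed := 1 + varbytes
  fixed + variable_

-- ===== PORT B =====
def mqtt_publish_header_len_alt (topic : String) (qos : Int) (payload_len : Int) : Int :=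
  let variable_ := 2 + PySem.Str.len topic + (if 0 < qos then 2 else 0)
  let remaining := variable_ + payload_len
  let varbytes : Int :=
    if remaining ≤ 127 then 1
    else PySem.Int.floordiv ((PySem.Int.bitLength remaining : Int) + 6) 7
  1 + varbytes + variable_

-- ===== PRECONDITION & SPEC =====
def Spec_mqtt_publish_header_len (topic : String) (qos : Int) (payload_len : Int) (out : Int) : Prop := out = mqtt_publish_header_len_alt topic qos payload_len
instance (topic : String) (qos : Int) (payload_len : Int) (out : Int) : Decidable (Spec_mqtt_publish_header_len topic qos payload_len out) := by unfold Spec_mqtt_publish_header_len; infer_instance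

-- ===== CLAIM (what is proved, stated in full; the proofs are below) =====
def Claim_equal_mqtt_publish_header_len : Prop := ∀ (topic : String) (qos : Int) (payload_len : Int), Dom_mqtt_publish_header_len topic qos payload_len → Spec_mqtt_publish_header_len topic qos payload_len (mqtt_publish_header_len topic qos payload_len)

-- ===== LEMMAS AND PROOFS =====

-- the closed form B computes for varbytes
def pvVarbytesForm (v : Int) : Int :=
  if v ≤ 127 then 1 else PySem.Int.floordiv ((PySem.Int.bitLength v : Int) + 6) 7

-- bitLength is characterised by the bracket 2^(k-1) ≤ |n| < 2^k
lemma pv_bl_eq_of_bracket (n : Int) (k : Nat) (hn : n ≠ 0) (hk : 1 ≤ k)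
    (h1 : 2 ^ (k - 1) ≤ n.natAbs) (h2 : n.natAbs < 2 ^ k) :
    PySem.Int.bitLength n = k := by
  have hL1 := PySem.Int.two_pow_bitLength_le n hn
  have hL2 := PySem.Int.lt_two_pow_bitLength n
  set L := PySem.Int.bitLength n with hL
  have hLpos : 1 ≤ L := by
    by_contra h
    have : L = 0 := by omega
    rw [this] at hL2
    simp at hL2
    exact hn (Int.natAbs_eq_zero.mp (by omega))
  have a1 : L - 1 < k := by
    have : (2:Nat) ^ (L - 1) < 2 ^ k := lt_of_le_of_lt hL1 h2
    exact (Nat.pow_lt_pow_iff_right (by norm_num)).mp this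
  have a2 : k - 1 < L := by
    have : (2:Nat) ^ (k - 1) < 2 ^ L := lt_of_le_of_lt h1 hL2
    exact (Nat.pow_lt_pow_iff_right (by norm_num)).mp this
  omega

lemma pv_bl_div128 (v : Int) (hv : 128 ≤ v) :
    PySem.Int.bitLength (v / 128) = PySem.Int.bitLength v - 7 := by
  set L := PySem.Int.bitLength v with hL
  have hbr1 := PySem.Int.two_pow_bitLength_le v (by omega)
  have hbr2 := PySem.Int.lt_two_pow_bitLength v
  have hna : v.natAbs = v.toNat := by omega
  rw [hna, ← hL] at hbr1 hbr2
  have hm : 128 ≤ v.toNat := by omega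
  have hL8 : 8 ≤ L := by
    by_contra h
    have : (2:Nat) ^ L ≤ 2 ^ 7 := Nat.pow_le_pow_right (by norm_num) (by omega)
    omega
  have hq : v / 128 = ((v.toNat / 128 : Nat) : Int) := by
    have hv' : v = ((v.toNat : Nat) : Int) := by omega
    rw [hv']
    exact_mod_cast (Int.natCast_div v.toNat 128).symm
  have hqpos : 1 ≤ v.toNat / 128 := (Nat.le_div_iff_mul_le (by norm_num)).mpr (by omega)
  have hnab : ((((v.toNat / 128 : Nat)) : Int)).natAbs = v.toNat / 128 := by exact_mod_cast rfl
  apply pv_bl_eq_of_bracket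
  · rw [hq]
    simp only [ne_eq, Nat.cast_eq_zero]
    omega
  · omega
  · rw [hq, hnab]
    apply (Nat.le_div_iff_mul_le (by norm_num)).mpr
    have hpow : (2:Nat) ^ (L - 7 - 1) * 128 = 2 ^ (L - 1) := by
      have h128 : (128:Nat) = 2 ^ 7 := by norm_num
      rw [h128, ← pow_add]
      congr 1
      omega
    rw [hpow]
    exact hbr1
  · rw [hq, hnab]
    apply (Nat.div_lt_iff_lt_mul (by norm_num)).mpr
    have hpow : (2:Nat) ^ (L - 7) * 128 = 2 ^ L := by
      have h128 : (128:Nat) = 2 ^ 7 := by norm_num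
      rw [h128, ← pow_add]
      congr 1
      omega
    rw [hpow]
    exact hbr2

-- bounds on bitLength from bounds on v
lemma pv_bl_ge (v : Int) (hv : 128 ≤ v) : 8 ≤ PySem.Int.bitLength v := by
  have hbr2 := PySem.Int.lt_two_pow_bitLength v
  by_contra h
  have : (2:Nat) ^ PySem.Int.bitLength v ≤ 2 ^ 7 := Nat.pow_le_pow_right (by norm_num) (by omega)
  omega

lemma pv_loop_eq : ∀ (n : Nat) (v b : Int), v.toNat = n →
    pvVarintLoop v b = b - 1 + pvVarbytesForm v := by
  intro n
  induction n using Nat.strong_induction_on with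
  | _ n ih =>
    intro v b hn
    rw [pvVarintLoop]
    split_ifs with h
    · -- 127 < v
      have hfd : PySem.Int.floordiv v 128 = v / 128 :=
        PySem.Int.floordiv_eq_ediv_of_pos (by norm_num)
      have hq : v / 128 = ((v.toNat / 128 : Nat) : Int) := by
        have : v = ((v.toNat : Nat) : Int) := by omega
        rw [this]; exact_mod_cast (Int.natCast_div v.toNat 128).symm
      have hlt : (v / 128).toNat < n := by
        rw [hq]; simp; omega
      rw [hfd, ih ((v / 128).toNat) hlt (v / 128) (b + 1) rfl]
      -- remains: (b+1) - 1 + form (v/128) = b - 1 + form v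
      have hbl := pv_bl_div128 v (by omega)
      have hL8 := pv_bl_ge v (by omega)
      unfold pvVarbytesForm
      simp only [PySem.Int.floordiv_eq_ediv_of_pos (show (0:Int) < 7 by norm_num)]
      by_cases hsmall : v / 128 ≤ 127
      · -- v < 16384, so bitLength v ∈ [8,14] and both sides give varbytes 2
        have hub : v < 16384 := by
          by_contra hub
          have : 128 ≤ v / 128 := by
            apply (Int.le_ediv_iff_mul_le (by norm_num)).mpr; omega
          omega
        have hL14 : PySem.Int.bitLength v ≤ 14 := by
          have hbr1 := PySem.Int.two_pow_bitLength_le v (by omega)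
          by_contra hc
          have : (2:Nat) ^ 14 ≤ 2 ^ (PySem.Int.bitLength v - 1) :=
            Nat.pow_le_pow_right (by norm_num) (by omega)
          have hna : v.natAbs = v.toNat := by omega
          omega
        simp only [if_pos hsmall, if_neg (by omega : ¬ v ≤ 127)]
        omega
      · -- 128 ≤ v/128 : both byte counts step by one
        simp only [if_neg hsmall, if_neg (by omega : ¬ v ≤ 127)]
        rw [hbl]
        have hc : ((PySem.Int.bitLength v - 7 : Nat) : Int) = (PySem.Int.bitLength v : Int) - 7 := by
          omega
        rw [hc]
        omega
    · -- v ≤ 127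
      unfold pvVarbytesForm
      rw [if_pos (by omega)]
      ring

-- ===== VERDICT (by name: the statement is the Claim_ definition above) =====
theorem mqtt_publish_header_len_spec : Claim_equal_mqtt_publish_header_len := by
  intro topic qos payload_len _
  unfold Spec_mqtt_publish_header_len mqtt_publish_header_len mqtt_publish_header_len_alt
  simp only
  rw [pv_loop_eq _ _ 1 rfl]
  unfold pvVarbytesForm
  ring
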